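-- pv_equiv track=rewrite | github.com/Edsel-Tan/dashboard | Solutions/923.py | convert
-- ===== SOURCE A (Python) =====
-- def convert(a, b, k):
--     x, y = 0, a * k
--     for i in range(k):
--         if y > x and y <= x + b:
--             return x+b-y, 0
--         x += b
--         if x < y and x > y - a:
--             return 0, y - x
--         if x == y-a:
--             return a, b
--         y -= a
-- ===== SOURCE B (Python) =====
-- def convert(a, b, k):
--     # Closed form: the loop's state at step i is x = i*b, y = a*k - i*a, and all
--     # three exit tests depend only on the gap g(i) = a*k - i*(a+b); each test's
--     # solution set in i is an interval, so the first triggering i is computed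
--     # directly with integer division instead of simulating k steps.
--     d = a + b
--     g0 = a * k
--
--     def first(L, U):
--         # smallest i in [0, k) with L < g0 - i*d <= U, else None
--         if L >= U:
--             return None
--         if d == 0:
--             i = 0
--         elif d > 0:
--             i = max(0, -((U - g0) // d))
--         else:
--             i = max(0, (L - g0) // (-d) + 1)
--         if i < k and L < g0 - i * d <= U:
--             return i
--         return None
--
--     i1 = first(0, b)        # exit 1: 0 < g <= b        -> (b - g, 0)
--     i2 = first(b, d - 1)    # exit 2: b < g < a + b     -> (0, g - b)
--     i3 = first(d - 1, d)    # exit 3: g = a + b         -> (a, b)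
--     best = None
--     if i1 is not None:
--         best = (i1, 1)
--     if i2 is not None and (best is None or i2 < best[0]):
--         best = (i2, 2)
--     if i3 is not None and (best is None or i3 < best[0]):
--         best = (i3, 3)
--     if best is None:
--         return None
--     i, c = best
--     g = g0 - i * d
--     if c == 1:
--         return b - g, 0
--     if c == 2:
--         return 0, g - b
--     return a, b
-- ===== Notes on version B (the rewrite author's own statement) =====
-- stated objective: faster
-- what changed: Replaced the k-step simulation with a closed form: each of the three exit tests depends only on the gap g(i)=a*k-i*(a+b), which is linear in i, so the first triggering step of each test is computed directly with one integer division and the best of the three candidates is returned.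
import Mathlib
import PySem

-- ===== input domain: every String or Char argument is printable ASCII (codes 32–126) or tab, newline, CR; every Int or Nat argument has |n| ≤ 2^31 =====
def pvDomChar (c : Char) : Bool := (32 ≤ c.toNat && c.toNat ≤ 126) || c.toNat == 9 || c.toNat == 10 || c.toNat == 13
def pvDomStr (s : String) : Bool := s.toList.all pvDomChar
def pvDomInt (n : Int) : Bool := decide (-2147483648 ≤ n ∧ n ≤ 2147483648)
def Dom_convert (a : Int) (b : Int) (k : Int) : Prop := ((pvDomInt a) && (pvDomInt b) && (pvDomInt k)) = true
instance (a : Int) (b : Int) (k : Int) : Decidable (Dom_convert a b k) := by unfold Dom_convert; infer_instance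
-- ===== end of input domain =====

-- B replaces A's k-step simulation by a closed form: each exit test is a linear
-- condition in the step index, solved directly with integer division (objective: faster).

-- ===== PORT A =====
-- A's for-loop; the range elements themselves are unused, only the iteration count
def convertGo (a : Int) (b : Int) : List Int → Int → Int → Option (Int × Int)
  | [], _, _ => none
  | _ :: rest, x, y =>
    if y > x ∧ y ≤ x + b then some (x + b - y, 0)
    else
      let x1 := x + b
      if x1 < y ∧ x1 > y - a then some (0, y - x1)
      else if x1 = y - a then some (a, b)
      else convertGo a b rest x1 (y - a)

def convert (a : Int) (b : Int) (k : Int) : Option (Int × Int) :=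
  convertGo a b (PySem.List.pyRange 0 k 1) 0 (a * k)

-- ===== PORT B =====
-- Source B's `first`: smallest i in [0, k) with L < g0 - i*d ≤ U, else none
def firstCand (d : Int) (g0 : Int) (k : Int) (L : Int) (U : Int) : Option Int :=
  if L ≥ U then none
  else
    let i : Int :=
      if d = 0 then 0
      else if 0 < d then max 0 (-(PySem.Int.floordiv (U - g0) d))
      else max 0 (PySem.Int.floordiv (L - g0) (-d) + 1)
    if i < k ∧ L < g0 - i * d ∧ g0 - i * d ≤ U then some i else none

def convert_alt (a : Int) (b : Int) (k : Int) : Option (Int × Int) :=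
  let d := a + b
  let g0 := a * k
  let i1 := firstCand d g0 k 0 b
  let i2 := firstCand d g0 k b (d - 1)
  let i3 := firstCand d g0 k (d - 1) d
  let best : Option (Int × Int) :=
    match i1 with
    | some i => some (i, 1)
    | none => none
  let best : Option (Int × Int) :=
    match i2, best with
    | some i, none => some (i, 2)
    | some i, some p => if i < p.1 then some (i, 2) else some p
    | none, p => p
  let best : Option (Int × Int) :=
    match i3, best with
    | some i, none => some (i, 3)
    | some i, some p => if i < p.1 then some (i, 3) else some p
    | none, p => p
  match best with
  | none => none
  | some (i, c) =>
    let g := g0 - i * d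
    if c = 1 then some (b - g, 0)
    else if c = 2 then some (0, g - b)
    else some (a, b)

-- ===== PRECONDITION & SPEC =====
def Spec_convert (a : Int) (b : Int) (k : Int) (out : Option (Int × Int)) : Prop := out = convert_alt a b k
instance (a : Int) (b : Int) (k : Int) (out : Option (Int × Int)) : Decidable (Spec_convert a b k out) := by unfold Spec_convert; infer_instance

-- ===== CLAIM (what is proved, stated in full; the proofs are below) =====
def Claim_equal_convert : Prop := ∀ (a : Int) (b : Int) (k : Int), Dom_convert a b k → Spec_convert a b k (convert a b k)

-- ===== LEMMAS AND PROOFS =====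

-- one loop step's exit decision, as a function of the gap g = y - x only
def stepF (a : Int) (b : Int) (g : Int) : Option (Int × Int) :=
  if 0 < g ∧ g ≤ b then some (b - g, 0)
  else if b < g ∧ g < a + b then some (0, g - b)
  else if g = a + b then some (a, b)
  else none

-- A's loop, indexed by remaining iteration count and current gap
def firstHit (a : Int) (b : Int) : Nat → Int → Option (Int × Int)
  | 0, _ => none
  | n + 1, g => (stepF a b g).orElse (fun _ => firstHit a b n (g - (a + b)))

theorem firstHit_succ_some (a b g : Int) (n : Nat) (v : Int × Int)
    (h : stepF a b g = some v) : firstHit a b (n + 1) g = some v := by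
  simp only [firstHit, h]; rfl

theorem firstHit_succ_none (a b g : Int) (n : Nat)
    (h : stepF a b g = none) : firstHit a b (n + 1) g = firstHit a b n (g - (a + b)) := by
  simp only [firstHit, h]; rfl

theorem convertGo_eq_firstHit (a b : Int) (l : List Int) (x y : Int) :
    convertGo a b l x y = firstHit a b l.length (y - x) := by
  induction l generalizing x y with
  | nil => rfl
  | cons h t ih =>
    simp only [convertGo, List.length_cons]
    by_cases h1 : 0 < y - x ∧ y - x ≤ b
    · rw [if_pos (show y > x ∧ y ≤ x + b by omega),
        firstHit_succ_some a b _ _ _ (show stepF a b (y - x) = some (b - (y - x), 0) from by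
          simp only [stepF]; rw [if_pos h1])]
      rw [show x + b - y = b - (y - x) from by ring]
    · rw [if_neg (show ¬(y > x ∧ y ≤ x + b) by omega)]
      by_cases h2 : b < y - x ∧ y - x < a + b
      · rw [if_pos (show x + b < y ∧ x + b > y - a by omega),
          firstHit_succ_some a b _ _ _ (show stepF a b (y - x) = some (0, y - x - b) from by
            simp only [stepF]; rw [if_neg h1, if_pos h2])]
        rw [show y - (x + b) = y - x - b from by ring]
      · rw [if_neg (show ¬(x + b < y ∧ x + b > y - a) by omega)]
        by_cases h3 : y - x = a + b
        · rw [if_pos (show x + b = y - a by omega),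
            firstHit_succ_some a b _ _ _ (show stepF a b (y - x) = some (a, b) from by
              simp only [stepF]; rw [if_neg h1, if_neg h2, if_pos h3])]
        · rw [if_neg (show ¬(x + b = y - a) by omega),
            firstHit_succ_none a b _ _ (show stepF a b (y - x) = none from by
              simp only [stepF]; rw [if_neg h1, if_neg h2, if_neg h3]), ih]
          congr 1
          omega

theorem convert_eq_firstHit (a b k : Int) :
    convert a b k = firstHit a b k.toNat (a * k) := by
  rw [convert, convertGo_eq_firstHit]
  have hl : (PySem.List.pyRange 0 k 1).length = k.toNat := by
    rw [PySem.List.length_pyRange_one]; omega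
  rw [hl]
  congr 1
  omega

theorem firstHit_eq_none (a b : Int) (n : Nat) (g : Int)
    (h : ∀ j : Nat, j < n → stepF a b (g - j * (a + b)) = none) :
    firstHit a b n g = none := by
  induction n generalizing g with
  | zero => rfl
  | succ m ih =>
    have h0 := h 0 (by omega)
    simp only [Nat.cast_zero, zero_mul, sub_zero] at h0
    rw [firstHit_succ_none a b _ _ h0]
    exact ih _ (fun j hj => by
      have hx := h (j + 1) (by omega)
      convert hx using 2
      push_cast; ring)

theorem firstHit_eq_some (a b : Int) (n : Nat) (g : Int) (j : Nat) (v : Int × Int)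
    (hj : j < n) (hv : stepF a b (g - j * (a + b)) = some v)
    (hmin : ∀ j' : Nat, j' < j → stepF a b (g - j' * (a + b)) = none) :
    firstHit a b n g = some v := by
  induction n generalizing g j with
  | zero => omega
  | succ m ih =>
    cases j with
    | zero =>
      simp only [Nat.cast_zero, zero_mul, sub_zero] at hv
      exact firstHit_succ_some a b _ _ _ hv
    | succ j' =>
      have h0 := hmin 0 (by omega)
      simp only [Nat.cast_zero, zero_mul, sub_zero] at h0
      rw [firstHit_succ_none a b _ _ h0]
      refine ih _ j' (by omega) ?_ ?_
      · convert hv using 2; push_cast; ring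
      · intro j'' hj''
        have hx := hmin (j'' + 1) (by omega)
        convert hx using 2; push_cast; ring

-- Int-indexed wrappers
theorem firstHit_some_of (a b k : Int) (i : Int) (v : Int × Int)
    (h0 : 0 ≤ i) (hk : i < k)
    (hstep : stepF a b (a * k - i * (a + b)) = some v)
    (hmin : ∀ j : Int, 0 ≤ j → j < i → stepF a b (a * k - j * (a + b)) = none) :
    firstHit a b k.toNat (a * k) = some v := by
  refine firstHit_eq_some a b k.toNat (a * k) i.toNat v (by omega) ?_ ?_
  · rw [Int.toNat_of_nonneg h0]; exact hstep
  · intro j' hj'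
    exact hmin j' (Int.natCast_nonneg j') (by omega)

theorem firstHit_none_of (a b k : Int)
    (hall : ∀ j : Int, 0 ≤ j → j < k → stepF a b (a * k - j * (a + b)) = none) :
    firstHit a b k.toNat (a * k) = none := by
  refine firstHit_eq_none a b k.toNat (a * k) ?_
  intro j hj
  exact hall j (Int.natCast_nonneg j) (by omega)

-- floor / ceiling division brackets
theorem floorFacts (x d : Int) (hd : 0 < d) :
    PySem.Int.floordiv x d * d ≤ x ∧ x < (PySem.Int.floordiv x d + 1) * d :=
  (PySem.Int.floordiv_eq_iff_of_pos hd).mp rfl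

theorem ceilFacts (x d : Int) (hd : 0 < d) :
    (-(PySem.Int.floordiv (-x) d) - 1) * d < x ∧ x ≤ -(PySem.Int.floordiv (-x) d) * d :=
  (PySem.Int.neg_floordiv_neg_eq_iff_of_pos hd).mp rfl

-- characterization of firstCand
theorem firstCand_some (d g0 k L U i : Int) (h : firstCand d g0 k L U = some i) :
    0 ≤ i ∧ i < k ∧ L < g0 - i * d ∧ g0 - i * d ≤ U ∧
      ∀ j : Int, 0 ≤ j → j < i → ¬(L < g0 - j * d ∧ g0 - j * d ≤ U) := by
  simp only [firstCand] at h
  by_cases hLU : L ≥ U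
  · rw [if_pos hLU] at h; cases h
  rw [if_neg hLU] at h
  rcases lt_trichotomy d 0 with hd | hd | hd
  · -- d < 0
    rw [if_neg (by omega : ¬d = 0), if_neg (by omega : ¬0 < d)] at h
    have hf := floorFacts (L - g0) (-d) (by omega)
    set q : Int := PySem.Int.floordiv (L - g0) (-d) with hq
    by_cases hchk : max 0 (q + 1) < k ∧ L < g0 - max 0 (q + 1) * d ∧ g0 - max 0 (q + 1) * d ≤ U
    swap
    · rw [if_neg hchk] at h; cases h
    rw [if_pos hchk] at h
    obtain rfl : max 0 (q + 1) = i := by simpa using h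
    refine ⟨le_max_left _ _, hchk.1, hchk.2.1, hchk.2.2, ?_⟩
    rintro j hj0 hji ⟨hA, _⟩
    have hmax : max 0 (q + 1) = q + 1 := by omega
    have hjq : j ≤ q := by omega
    have hm := mul_le_mul_of_nonneg_right hjq (show (0:Int) ≤ -d by omega)
    linarith [hf.1]
  · -- d = 0
    rw [if_pos hd] at h
    by_cases hchk : (0:Int) < k ∧ L < g0 - 0 * d ∧ g0 - 0 * d ≤ U
    swap
    · rw [if_neg hchk] at h; cases h
    rw [if_pos hchk] at h
    obtain rfl : (0:Int) = i := by simpa using h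
    exact ⟨le_refl _, hchk.1, hchk.2.1, hchk.2.2, fun j hj0 hji => by omega⟩
  · -- 0 < d
    rw [if_neg (by omega : ¬d = 0), if_pos hd] at h
    have hc := ceilFacts (g0 - U) d hd
    rw [neg_sub] at hc
    set q : Int := -(PySem.Int.floordiv (U - g0) d) with hq
    by_cases hchk : max 0 q < k ∧ L < g0 - max 0 q * d ∧ g0 - max 0 q * d ≤ U
    swap
    · rw [if_neg hchk] at h; cases h
    rw [if_pos hchk] at h
    obtain rfl : max 0 q = i := by simpa using h
    refine ⟨le_max_left _ _, hchk.1, hchk.2.1, hchk.2.2, ?_⟩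
    rintro j hj0 hji ⟨_, hB⟩
    have hmax : max 0 q = q := by omega
    have hjq : j ≤ q - 1 := by omega
    have hm := mul_le_mul_of_nonneg_right hjq hd.le
    linarith [hc.1]

theorem firstCand_none (d g0 k L U : Int) (h : firstCand d g0 k L U = none) :
    ∀ j : Int, 0 ≤ j → j < k → ¬(L < g0 - j * d ∧ g0 - j * d ≤ U) := by
  rintro j hj0 hjk ⟨hA, hB⟩
  simp only [firstCand] at h
  by_cases hLU : L ≥ U
  · linarith
  rw [if_neg hLU] at h
  rcases lt_trichotomy d 0 with hd | hd | hd
  · -- d < 0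
    rw [if_neg (by omega : ¬d = 0), if_neg (by omega : ¬0 < d)] at h
    have hf := floorFacts (L - g0) (-d) (by omega)
    set q : Int := PySem.Int.floordiv (L - g0) (-d) with hq
    have hcond : ¬(max 0 (q + 1) < k ∧ L < g0 - max 0 (q + 1) * d ∧ g0 - max 0 (q + 1) * d ≤ U) := by
      intro hc; rw [if_pos hc] at h; cases h
    have hlb : L < g0 - max 0 (q + 1) * d := by
      rcases (show q + 1 ≤ 0 ∨ 0 < q + 1 by omega) with hq0 | hq0
      · have hmax : max 0 (q + 1) = 0 := by omega
        have hm := mul_le_mul_of_nonneg_right hq0 (show (0:Int) ≤ -d by omega)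
        rw [hmax]; linarith [hf.2]
      · have hmax : max 0 (q + 1) = q + 1 := by omega
        rw [hmax]; linarith [hf.2]
    by_cases hik : max 0 (q + 1) < k
    · have hub2 : U < g0 - max 0 (q + 1) * d := by
        by_contra hu
        exact hcond ⟨hik, hlb, by omega⟩
      rcases (show j < max 0 (q + 1) ∨ max 0 (q + 1) ≤ j by omega) with hji | hji
      · have hmax : max 0 (q + 1) = q + 1 := by omega
        have hjq : j ≤ q := by omega
        have hm := mul_le_mul_of_nonneg_right hjq (show (0:Int) ≤ -d by omega)
        linarith [hf.1]
      · have hm := mul_le_mul_of_nonneg_right hji (show (0:Int) ≤ -d by omega)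
        linarith
    · have hmax : max 0 (q + 1) = q + 1 := by omega
      have hjq : j ≤ q := by omega
      have hm := mul_le_mul_of_nonneg_right hjq (show (0:Int) ≤ -d by omega)
      linarith [hf.1]
  · -- d = 0
    rw [if_pos hd] at h
    have hcond : ¬((0:Int) < k ∧ L < g0 - 0 * d ∧ g0 - 0 * d ≤ U) := by
      intro hc; rw [if_pos hc] at h; cases h
    rw [hd] at hA hB hcond
    simp only [mul_zero] at hA hB hcond
    omega
  · -- 0 < d
    rw [if_neg (by omega : ¬d = 0), if_pos hd] at h
    have hc := ceilFacts (g0 - U) d hd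
    rw [neg_sub] at hc
    set q : Int := -(PySem.Int.floordiv (U - g0) d) with hq
    have hcond : ¬(max 0 q < k ∧ L < g0 - max 0 q * d ∧ g0 - max 0 q * d ≤ U) := by
      intro hc2; rw [if_pos hc2] at h; cases h
    have hub : g0 - max 0 q * d ≤ U := by
      rcases (show q ≤ 0 ∨ 0 < q by omega) with hq0 | hq0
      · have hmax : max 0 q = 0 := by omega
        have hm := mul_le_mul_of_nonneg_right hq0 hd.le
        rw [hmax]; linarith [hc.2]
      · have hmax : max 0 q = q := by omega
        rw [hmax]; linarith [hc.2]
    by_cases hik : max 0 q < k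
    · have hlow : g0 - max 0 q * d ≤ L := by
        by_contra hl
        exact hcond ⟨hik, by omega, hub⟩
      rcases (show j < max 0 q ∨ max 0 q ≤ j by omega) with hji | hji
      · have hmax : max 0 q = q := by omega
        have hjq : j ≤ q - 1 := by omega
        have hm := mul_le_mul_of_nonneg_right hjq hd.le
        linarith [hc.1]
      · have hm := mul_le_mul_of_nonneg_right hji hd.le
        linarith
    · have hmax : max 0 q = q := by omega
      have hjq : j ≤ q - 1 := by omega
      have hm := mul_le_mul_of_nonneg_right hjq hd.le
      linarith [hc.1]

-- stepF evaluation lemmas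
theorem stepF_eq_one (a b g : Int) (h1 : 0 < g ∧ g ≤ b) : stepF a b g = some (b - g, 0) := by
  simp only [stepF]; rw [if_pos h1]

theorem stepF_eq_two (a b g : Int) (h2 : b < g ∧ g < a + b) : stepF a b g = some (0, g - b) := by
  simp only [stepF]; rw [if_neg (by omega), if_pos h2]

theorem stepF_eq_three (a b g : Int) (h1 : ¬(0 < g ∧ g ≤ b)) (h3 : g = a + b) :
    stepF a b g = some (a, b) := by
  simp only [stepF]; rw [if_neg h1, if_neg (by omega), if_pos h3]

theorem stepF_eq_none (a b g : Int) (h1 : ¬(0 < g ∧ g ≤ b)) (h2 : ¬(b < g ∧ g < a + b))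
    (h3 : g ≠ a + b) : stepF a b g = none := by
  simp only [stepF]; rw [if_neg h1, if_neg h2, if_neg h3]

-- the three "pick" lemmas: the chosen candidate wins the race
theorem pick_none (a b k : Int)
    (h1 : ∀ j : Int, 0 ≤ j → j < k → ¬((0:Int) < a * k - j * (a + b) ∧ a * k - j * (a + b) ≤ b))
    (h2 : ∀ j : Int, 0 ≤ j → j < k → ¬(b < a * k - j * (a + b) ∧ a * k - j * (a + b) ≤ (a + b) - 1))
    (h3 : ∀ j : Int, 0 ≤ j → j < k → ¬((a + b) - 1 < a * k - j * (a + b) ∧ a * k - j * (a + b) ≤ a + b)) :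
    firstHit a b k.toNat (a * k) = none := by
  refine firstHit_none_of a b k (fun j hj0 hjk => ?_)
  have c1 := h1 j hj0 hjk
  have c2 := h2 j hj0 hjk
  have c3 := h3 j hj0 hjk
  generalize hG : a * k - j * (a + b) = G at c1 c2 c3
  exact stepF_eq_none a b G c1 (by omega) (by omega)

theorem pick_one (a b k i1 : Int)
    (e1 : firstCand (a + b) (a * k) k 0 b = some i1)
    (h2 : ∀ j : Int, 0 ≤ j → j < i1 → ¬(b < a * k - j * (a + b) ∧ a * k - j * (a + b) ≤ (a + b) - 1))
    (h3 : ∀ j : Int, 0 ≤ j → j < i1 → ¬((a + b) - 1 < a * k - j * (a + b) ∧ a * k - j * (a + b) ≤ a + b)) :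
    firstHit a b k.toNat (a * k) = some (b - (a * k - i1 * (a + b)), 0) := by
  obtain ⟨hi0, hik, hA, hB, hmin⟩ := firstCand_some _ _ _ _ _ _ e1
  refine firstHit_some_of a b k i1 _ hi0 hik (stepF_eq_one a b _ ⟨hA, hB⟩) ?_
  intro j hj0 hji
  have c1 := hmin j hj0 hji
  have c2 := h2 j hj0 hji
  have c3 := h3 j hj0 hji
  generalize hG : a * k - j * (a + b) = G at c1 c2 c3
  exact stepF_eq_none a b G (by omega) (by omega) (by omega)

theorem pick_two (a b k i2 : Int)
    (e2 : firstCand (a + b) (a * k) k b ((a + b) - 1) = some i2)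
    (h1 : ∀ j : Int, 0 ≤ j → j ≤ i2 → ¬((0:Int) < a * k - j * (a + b) ∧ a * k - j * (a + b) ≤ b))
    (h3 : ∀ j : Int, 0 ≤ j → j < i2 → ¬((a + b) - 1 < a * k - j * (a + b) ∧ a * k - j * (a + b) ≤ a + b)) :
    firstHit a b k.toNat (a * k) = some (0, (a * k - i2 * (a + b)) - b) := by
  obtain ⟨hi0, hik, hA, hB, hmin⟩ := firstCand_some _ _ _ _ _ _ e2
  refine firstHit_some_of a b k i2 _ hi0 hik (stepF_eq_two a b _ ⟨hA, by omega⟩) ?_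
  intro j hj0 hji
  have c1 := h1 j hj0 (by omega)
  have c2 := hmin j hj0 hji
  have c3 := h3 j hj0 hji
  generalize hG : a * k - j * (a + b) = G at c1 c2 c3
  exact stepF_eq_none a b G (by omega) (by omega) (by omega)

theorem pick_three (a b k i3 : Int)
    (e3 : firstCand (a + b) (a * k) k ((a + b) - 1) (a + b) = some i3)
    (h1 : ∀ j : Int, 0 ≤ j → j ≤ i3 → ¬((0:Int) < a * k - j * (a + b) ∧ a * k - j * (a + b) ≤ b))
    (h2 : ∀ j : Int, 0 ≤ j → j < i3 → ¬(b < a * k - j * (a + b) ∧ a * k - j * (a + b) ≤ (a + b) - 1)) :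
    firstHit a b k.toNat (a * k) = some (a, b) := by
  obtain ⟨hi0, hik, hA, hB, hmin⟩ := firstCand_some _ _ _ _ _ _ e3
  refine firstHit_some_of a b k i3 _ hi0 hik
    (stepF_eq_three a b _ (h1 i3 hi0 (le_refl _)) (by omega)) ?_
  intro j hj0 hji
  have c1 := h1 j hj0 (by omega)
  have c2 := h2 j hj0 hji
  have c3 := hmin j hj0 hji
  generalize hG : a * k - j * (a + b) = G at c1 c2 c3
  exact stepF_eq_none a b G (by omega) (by omega) (by omega)

-- ===== VERDICT (by name: the statement is the Claim_ definition above) =====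
theorem convert_spec : Claim_equal_convert := by
  intro a b k _
  show convert a b k = convert_alt a b k
  rw [convert_eq_firstHit]
  simp only [convert_alt]
  rcases e1 : firstCand (a + b) (a * k) k 0 b with _ | i1 <;>
    rcases e2 : firstCand (a + b) (a * k) k b ((a + b) - 1) with _ | i2 <;>
      rcases e3 : firstCand (a + b) (a * k) k ((a + b) - 1) (a + b) with _ | i3
  -- n n n
  · exact pick_none a b k (firstCand_none _ _ _ _ _ e1) (firstCand_none _ _ _ _ _ e2)
      (firstCand_none _ _ _ _ _ e3)
  -- n n s
  · have f3 := firstCand_some _ _ _ _ _ _ e3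
    simp only [if_neg (by norm_num : ¬(3:Int) = 1), if_neg (by norm_num : ¬(3:Int) = 2)]
    exact pick_three a b k i3 e3
      (fun j hj0 hji => firstCand_none _ _ _ _ _ e1 j hj0 (by omega))
      (fun j hj0 hji => firstCand_none _ _ _ _ _ e2 j hj0 (by omega))
  -- n s n
  · have f2 := firstCand_some _ _ _ _ _ _ e2
    simp only [if_neg (by norm_num : ¬(2:Int) = 1)]
    exact pick_two a b k i2 e2
      (fun j hj0 hji => firstCand_none _ _ _ _ _ e1 j hj0 (by omega))
      (fun j hj0 hji => firstCand_none _ _ _ _ _ e3 j hj0 (by omega))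
  -- n s s
  · have f2 := firstCand_some _ _ _ _ _ _ e2
    have f3 := firstCand_some _ _ _ _ _ _ e3
    dsimp only
    by_cases hcmp : i3 < i2
    · rw [if_pos hcmp]
      simp only [if_neg (by norm_num : ¬(3:Int) = 1), if_neg (by norm_num : ¬(3:Int) = 2)]
      exact pick_three a b k i3 e3
        (fun j hj0 hji => firstCand_none _ _ _ _ _ e1 j hj0 (by omega))
        (fun j hj0 hji => f2.2.2.2.2 j hj0 (by omega))
    · rw [if_neg hcmp]
      simp only [if_neg (by norm_num : ¬(2:Int) = 1)]
      exact pick_two a b k i2 e2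
        (fun j hj0 hji => firstCand_none _ _ _ _ _ e1 j hj0 (by omega))
        (fun j hj0 hji => f3.2.2.2.2 j hj0 (by omega))
  -- s n n
  · have f1 := firstCand_some _ _ _ _ _ _ e1
    exact pick_one a b k i1 e1
      (fun j hj0 hji => firstCand_none _ _ _ _ _ e2 j hj0 (by omega))
      (fun j hj0 hji => firstCand_none _ _ _ _ _ e3 j hj0 (by omega))
  -- s n s
  · have f1 := firstCand_some _ _ _ _ _ _ e1
    have f3 := firstCand_some _ _ _ _ _ _ e3
    dsimp only
    by_cases hcmp : i3 < i1
    · rw [if_pos hcmp]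
      simp only [if_neg (by norm_num : ¬(3:Int) = 1), if_neg (by norm_num : ¬(3:Int) = 2)]
      exact pick_three a b k i3 e3
        (fun j hj0 hji => f1.2.2.2.2 j hj0 (by omega))
        (fun j hj0 hji => firstCand_none _ _ _ _ _ e2 j hj0 (by omega))
    · rw [if_neg hcmp]
      exact pick_one a b k i1 e1
        (fun j hj0 hji => firstCand_none _ _ _ _ _ e2 j hj0 (by omega))
        (fun j hj0 hji => f3.2.2.2.2 j hj0 (by omega))
  -- s s n
  · have f1 := firstCand_some _ _ _ _ _ _ e1
    have f2 := firstCand_some _ _ _ _ _ _ e2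
    dsimp only
    by_cases hcmp : i2 < i1
    · rw [if_pos hcmp]
      simp only [if_neg (by norm_num : ¬(2:Int) = 1)]
      exact pick_two a b k i2 e2
        (fun j hj0 hji => f1.2.2.2.2 j hj0 (by omega))
        (fun j hj0 hji => firstCand_none _ _ _ _ _ e3 j hj0 (by omega))
    · rw [if_neg hcmp]
      exact pick_one a b k i1 e1
        (fun j hj0 hji => f2.2.2.2.2 j hj0 (by omega))
        (fun j hj0 hji => firstCand_none _ _ _ _ _ e3 j hj0 (by omega))
  -- s s s
  · have f1 := firstCand_some _ _ _ _ _ _ e1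
    have f2 := firstCand_some _ _ _ _ _ _ e2
    have f3 := firstCand_some _ _ _ _ _ _ e3
    dsimp only
    by_cases hcmp12 : i2 < i1
    · rw [if_pos hcmp12]
      dsimp only
      by_cases hcmp : i3 < i2
      · rw [if_pos hcmp]
        simp only [if_neg (by norm_num : ¬(3:Int) = 1), if_neg (by norm_num : ¬(3:Int) = 2)]
        exact pick_three a b k i3 e3
          (fun j hj0 hji => f1.2.2.2.2 j hj0 (by omega))
          (fun j hj0 hji => f2.2.2.2.2 j hj0 (by omega))
      · rw [if_neg hcmp]
        simp only [if_neg (by norm_num : ¬(2:Int) = 1)]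
        exact pick_two a b k i2 e2
          (fun j hj0 hji => f1.2.2.2.2 j hj0 (by omega))
          (fun j hj0 hji => f3.2.2.2.2 j hj0 (by omega))
    · rw [if_neg hcmp12]
      dsimp only
      by_cases hcmp : i3 < i1
      · rw [if_pos hcmp]
        simp only [if_neg (by norm_num : ¬(3:Int) = 1), if_neg (by norm_num : ¬(3:Int) = 2)]
        exact pick_three a b k i3 e3
          (fun j hj0 hji => f1.2.2.2.2 j hj0 (by omega))
          (fun j hj0 hji => f2.2.2.2.2 j hj0 (by omega))
      · rw [if_neg hcmp]
        exact pick_one a b k i1 e1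
          (fun j hj0 hji => f2.2.2.2.2 j hj0 (by omega))
          (fun j hj0 hji => f3.2.2.2.2 j hj0 (by omega))
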